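-- pv_equiv track=rewrite | github.com/pczarnowska/morph-bli | reinflector/src/reader.py | _merge_tags_helper
-- ===== SOURCE A (Python) =====
-- def _merge_tags_helper(tag_set):
--     ftype2vals = {}
--     for ftype2val in tag_set:
--         for ftype, val in ftype2val.items():
--             if ftype == "lemma":
--                 continue
--             val_set = ftype2vals.setdefault(ftype, set())
--             val_set.add(val)
--
--     new_tag = []
--     for ftype, vals in ftype2vals.items():
--         vals = list(vals)
--         single_val = '/'.join(sorted(vals))
--         new_tag.append(single_val)
--     return ';'.join(sorted(new_tag))
-- ===== SOURCE B (Python) =====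
-- def _merge_tags_helper(tag_set):
--     pairs = [(ft, v) for d in tag_set for ft, v in d.items() if ft != "lemma"]
--     ftypes = sorted(set(ft for ft, _ in pairs))
--     groups = ['/'.join(sorted({v for ft2, v in pairs if ft2 == ft}))
--               for ft in ftypes]
--     return ';'.join(sorted(groups))
-- ===== Notes on version B (the rewrite author's own statement) =====
-- stated objective: idiomatic
-- what changed: Replaces A's incremental dict-of-sets accumulation with flat comprehensions: flatten the non-lemma (ftype,val) pairs once, take the sorted distinct ftypes, and build each group string by filtering the flat pair list per ftype.
import Mathlib
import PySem

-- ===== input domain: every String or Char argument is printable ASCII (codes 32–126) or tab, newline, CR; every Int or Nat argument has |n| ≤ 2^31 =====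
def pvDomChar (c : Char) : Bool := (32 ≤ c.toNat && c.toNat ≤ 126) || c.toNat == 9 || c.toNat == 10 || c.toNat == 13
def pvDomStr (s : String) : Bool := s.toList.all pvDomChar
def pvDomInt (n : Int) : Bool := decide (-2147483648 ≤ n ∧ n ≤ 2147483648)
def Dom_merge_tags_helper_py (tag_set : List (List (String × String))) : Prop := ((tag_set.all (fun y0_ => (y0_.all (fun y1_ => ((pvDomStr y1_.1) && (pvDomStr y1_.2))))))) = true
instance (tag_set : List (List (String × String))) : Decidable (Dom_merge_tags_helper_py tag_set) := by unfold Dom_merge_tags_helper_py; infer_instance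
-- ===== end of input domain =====

-- B replaces A's incremental dict-of-sets accumulation with flat comprehensions
-- (flatten pairs once, sorted distinct ftypes, per-ftype filter); objective: idiomatic.

-- ===== PORT A =====
-- 'val_set = d.setdefault(ftype, set()); val_set.add(val)' mutates the set stored
-- at ftype in place, i.e. d[ftype] = d.get(ftype, set()).add(val) keeping position:
-- exactly PySem.Dict.modify ftype Set.empty (fun s => s.add val).
def merge_tags_helper_py (tag_set : List (List (String × String))) : String :=
  let ftype2vals : PySem.Dict String (PySem.Set String) :=
    tag_set.foldl (fun d ftype2val =>
      ((PySem.Dict.ofList ftype2val).items).foldl (fun d p =>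
        if p.1 == "lemma" then d
        else d.modify p.1 PySem.Set.empty (fun s => PySem.Set.add s p.2)) d)
      PySem.Dict.empty
  let new_tag : List String :=
    ftype2vals.items.foldl (fun acc p =>
      acc ++ [PySem.Str.join "/" (PySem.List.sorted p.2 (fun x => x) false)]) []
  PySem.Str.join ";" (PySem.List.sorted new_tag (fun x => x) false)

-- ===== PORT B =====
def merge_tags_helper_py_alt (tag_set : List (List (String × String))) : String :=
  let pairs : List (String × String) :=
    tag_set.flatMap (fun d =>
      ((PySem.Dict.ofList d).items).filter (fun p => !(p.1 == "lemma")))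
  let ftypes : List String :=
    PySem.List.sorted (PySem.Set.ofList (pairs.map (·.1))) (fun x => x) false
  let groups : List String :=
    ftypes.map (fun ft =>
      PySem.Str.join "/"
        (PySem.List.sorted (PySem.Set.ofList ((pairs.filter (fun p => p.1 == ft)).map (·.2))) (fun x => x) false))
  PySem.Str.join ";" (PySem.List.sorted groups (fun x => x) false)

-- ===== PRECONDITION & SPEC =====
def Spec_merge_tags_helper_py (tag_set : List (List (String × String))) (out : String) : Prop := out = merge_tags_helper_py_alt tag_set
instance (tag_set : List (List (String × String))) (out : String) : Decidable (Spec_merge_tags_helper_py tag_set out) := by unfold Spec_merge_tags_helper_py; infer_instance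

-- ===== CLAIM (what is proved, stated in full; the proofs are below) =====
def Claim_equal_merge_tags_helper_py : Prop := ∀ (tag_set : List (List (String × String))), Dom_merge_tags_helper_py tag_set → Spec_merge_tags_helper_py tag_set (merge_tags_helper_py tag_set)

-- ===== LEMMAS AND PROOFS =====

-- A's dict-build step after the "lemma" filter
def pvMStep (d : PySem.Dict String (PySem.Set String)) (p : String × String) :
    PySem.Dict String (PySem.Set String) :=
  d.modify p.1 PySem.Set.empty (fun s => PySem.Set.add s p.2)

-- the flattened non-"lemma" (ftype, val) pairs, shared by both characterizations
def pvFlt (tag_set : List (List (String × String))) : List (String × String) :=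
  tag_set.flatMap (fun d =>
    ((PySem.Dict.ofList d).items).filter (fun p => !(p.1 == "lemma")))

theorem pv_inner (l : List (String × String)) (d : PySem.Dict String (PySem.Set String)) :
    l.foldl (fun d p =>
      if p.1 == "lemma" then d
      else d.modify p.1 PySem.Set.empty (fun s => PySem.Set.add s p.2)) d
    = (l.filter (fun p => !(p.1 == "lemma"))).foldl pvMStep d := by
  induction l generalizing d with
  | nil => rfl
  | cons p t ih =>
    rw [List.foldl_cons, List.filter_cons]
    by_cases h : p.1 = "lemma"
    · rw [if_pos (by simp [h]), if_neg (by simp [h])]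
      exact ih d
    · rw [if_neg (by simp [h]), if_pos (by simp [h]), List.foldl_cons]
      exact ih _
  
theorem pv_nested (tag_set : List (List (String × String)))
    (d : PySem.Dict String (PySem.Set String)) :
    tag_set.foldl (fun d ftype2val =>
      ((PySem.Dict.ofList ftype2val).items).foldl (fun d p =>
        if p.1 == "lemma" then d
        else d.modify p.1 PySem.Set.empty (fun s => PySem.Set.add s p.2)) d) d
    = (pvFlt tag_set).foldl pvMStep d := by
  induction tag_set generalizing d with
  | nil => rfl
  | cons l t ih =>
    have hflt : pvFlt (l :: t)
        = (((PySem.Dict.ofList l).items).filter (fun p => !(p.1 == "lemma"))) ++ pvFlt t := by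
      simp [pvFlt]
    rw [List.foldl_cons, hflt, List.foldl_append, pv_inner]
    exact ih _

theorem pv_getD (l : List (String × String)) (d : PySem.Dict String (PySem.Set String))
    (c : String) :
    (l.foldl pvMStep d).getD c PySem.Set.empty
    = ((l.filter (fun p => p.1 == c)).map (·.2)).foldl PySem.Set.add
        (d.getD c PySem.Set.empty) := by
  induction l generalizing d with
  | nil => rfl
  | cons p t ih =>
    rw [List.foldl_cons, ih, List.filter_cons]
    by_cases h : p.1 = c
    · rw [if_pos (by simp [h]), List.map_cons, List.foldl_cons]
      have hd : (pvMStep d p).getD c PySem.Set.empty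
          = PySem.Set.add (d.getD c PySem.Set.empty) p.2 := by
        simp only [pvMStep, PySem.Dict.getD_modify]
        rw [if_pos h.symm, h]
      rw [hd]
    · rw [if_neg (by simp [h])]
      have hd : (pvMStep d p).getD c PySem.Set.empty = d.getD c PySem.Set.empty := by
        simp only [pvMStep, PySem.Dict.getD_modify]
        rw [if_neg (fun hc => h hc.symm)]
      rw [hd]

theorem pv_keys (l : List (String × String)) :
    (l.foldl pvMStep PySem.Dict.empty).keys = PySem.Set.ofList (l.map (·.1)) := by
  have h := PySem.Dict.keys_foldl_modify_key l (fun p : String × String => p.1)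
    PySem.Set.empty (fun _ p => fun s => PySem.Set.add s p.2) PySem.Dict.empty
  simpa [pvMStep, PySem.Dict.keys_empty, PySem.Set.update_nil_left] using h

theorem pv_keys_nodup (l : List (String × String)) :
    (l.foldl pvMStep PySem.Dict.empty).keys.Nodup := by
  have h := PySem.Dict.nodup_keys_foldl_modify_key l (fun p : String × String => p.1)
    PySem.Set.empty (fun _ p => fun s => PySem.Set.add s p.2) PySem.Dict.empty
    PySem.Dict.nodup_keys_empty
  simpa [pvMStep] using h

theorem pv_append_map {α β : Type} (l : List α) (g : α → β) (acc : List β) :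
    l.foldl (fun acc x => acc ++ [g x]) acc = acc ++ l.map g := by
  induction l generalizing acc with
  | nil => simp
  | cons x t ih => simp [ih]

theorem pv_foldl_add_eq_ofList (xs : List String) :
    xs.foldl PySem.Set.add PySem.Set.empty = PySem.Set.ofList xs := rfl

-- ===== VERDICT (by name: the statement is the Claim_ definition above) =====
theorem merge_tags_helper_py_spec : Claim_equal_merge_tags_helper_py := by
  intro tag_set _
  unfold Spec_merge_tags_helper_py merge_tags_helper_py merge_tags_helper_py_alt
  dsimp only
  rw [pv_nested, pv_append_map,
    PySem.Dict.items_eq_map_keys _ (pv_keys_nodup (pvFlt tag_set)) PySem.Set.empty,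
    pv_keys, List.nil_append, List.map_map]
  simp only [pv_getD, PySem.Dict.getD_empty, pv_foldl_add_eq_ofList, pvFlt]
  congr 1
  apply (PySem.List.sorted_id_eq_sorted_id_iff_perm _ _).mpr
  exact (List.Perm.map _ (PySem.List.sorted_perm _ _ _)).symm
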